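-- pv_equiv track=rewrite | github.com/samsambutdifferent/enigmav4 | helper.py | lengths_out_of_range
-- ===== SOURCE A (Python) =====
-- def lengths_out_of_range(keys, max, min):
--     for key in keys:
--         if len(key) > max or len(key) < min:
--             return True
--         for check_key in keys:
--             if len(key) != len(check_key):
--                 return True
--
--     return False
-- ===== SOURCE B (Python) =====
-- def lengths_out_of_range(keys, max, min):
--     lengths = [len(k) for k in keys]
--     if not keys:
--         return False
--     return any(l > max or l < min for l in lengths) or len(set(lengths)) > 1
-- ===== Notes on version B (the rewrite author's own statement) =====
-- stated objective: simpler
-- what changed: Collect all key lengths in one pass, then answer with a flat aggregate (any out-of-range) plus a set-cardinality uniqueness test, replacing A's early-return nested all-pairs comparison loop.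
import Mathlib
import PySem

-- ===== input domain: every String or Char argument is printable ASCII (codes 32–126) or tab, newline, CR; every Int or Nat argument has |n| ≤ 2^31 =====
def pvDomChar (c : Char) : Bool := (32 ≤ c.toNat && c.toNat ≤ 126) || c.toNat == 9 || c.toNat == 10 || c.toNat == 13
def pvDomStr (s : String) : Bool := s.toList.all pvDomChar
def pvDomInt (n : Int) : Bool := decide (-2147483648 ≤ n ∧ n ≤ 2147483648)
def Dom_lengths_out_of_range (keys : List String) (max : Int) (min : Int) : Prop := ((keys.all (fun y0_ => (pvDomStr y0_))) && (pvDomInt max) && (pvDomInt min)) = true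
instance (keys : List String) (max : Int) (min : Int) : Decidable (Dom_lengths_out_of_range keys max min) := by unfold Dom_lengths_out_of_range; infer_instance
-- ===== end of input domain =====

-- B replaces A's early-return nested all-pairs loop by one pass collecting the lengths,
-- then an aggregate range check plus a set-cardinality uniqueness test (objective: simpler).

-- ===== PORT A =====
-- outer for-loop with early returns; the inner for-loop's early return is List.any
def pvALoop (all : List String) (max min : Int) : List String → Bool
  | [] => false
  | k :: rest =>
    if PySem.Str.len k > max || PySem.Str.len k < min then true
    else if all.any (fun ck => PySem.Str.len k != PySem.Str.len ck) then true
    else pvALoop all max min rest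

def lengths_out_of_range (keys : List String) (max : Int) (min : Int) : Bool :=
  pvALoop keys max min keys

-- ===== PORT B =====
def lengths_out_of_range_alt (keys : List String) (max : Int) (min : Int) : Bool :=
  let lengths := keys.map (fun k => PySem.Str.len k)
  if keys.isEmpty then false
  else lengths.any (fun l => l > max || l < min) || decide ((PySem.Set.ofList lengths).length > 1)

-- ===== PRECONDITION & SPEC =====
def Spec_lengths_out_of_range (keys : List String) (max : Int) (min : Int) (out : Bool) : Prop := out = lengths_out_of_range_alt keys max min
instance (keys : List String) (max : Int) (min : Int) (out : Bool) : Decidable (Spec_lengths_out_of_range keys max min out) := by unfold Spec_lengths_out_of_range; infer_instance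

-- ===== CLAIM (what is proved, stated in full; the proofs are below) =====
def Claim_equal_lengths_out_of_range : Prop := ∀ (keys : List String) (max : Int) (min : Int), Dom_lengths_out_of_range keys max min → Spec_lengths_out_of_range keys max min (lengths_out_of_range keys max min)

-- ===== LEMMAS AND PROOFS =====

theorem pvALoop_false_iff (all : List String) (max min : Int) (l : List String) :
    pvALoop all max min l = false ↔
      ∀ k ∈ l, PySem.Str.len k ≤ max ∧ min ≤ PySem.Str.len k ∧
        ∀ ck ∈ all, PySem.Str.len k = PySem.Str.len ck := by
  induction l with
  | nil => simp [pvALoop]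
  | cons k rest ih =>
    simp only [pvALoop, List.mem_cons]
    split_ifs with h1 h2
    · simp only [Bool.or_eq_true, decide_eq_true_eq] at h1
      constructor
      · intro h; cases h
      · intro h; rcases h k (Or.inl rfl) with ⟨ha, hb, _⟩; omega
    · simp only [List.any_eq_true, bne_iff_ne] at h2
      constructor
      · intro h; cases h
      · intro h
        rcases h2 with ⟨ck, hck, hne⟩
        exact absurd ((h k (Or.inl rfl)).2.2 ck hck) hne
    · simp only [Bool.or_eq_true, decide_eq_true_eq, not_or, not_lt] at h1
      simp only [List.any_eq_true, bne_iff_ne] at h2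
      push Not at h2
      rw [ih]
      constructor
      · intro h
        rintro x (rfl | hx)
        · exact ⟨h1.1, h1.2, h2⟩
        · exact h x hx
      · intro h x hx; exact h x (Or.inr hx)

theorem nodup_length_le_one_iff (L : List Int) (h : L.Nodup) :
    L.length ≤ 1 ↔ ∀ a ∈ L, ∀ b ∈ L, a = b := by
  constructor
  · intro hl a ha b hb
    match L, hl with
    | [], _ => cases ha
    | [x], _ =>
      simp only [List.mem_singleton] at ha hb; omega
  · intro hall
    match L, h with
    | [], _ => simp
    | [x], _ => simp
    | a :: b :: rest, hnd =>
      exfalso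
      have hab : a = b := hall a (by simp) b (by simp)
      have : a ∉ b :: rest := (List.nodup_cons.mp hnd).1
      exact this (hab ▸ List.mem_cons_self)

theorem alt_false_iff (keys : List String) (max min : Int) :
    lengths_out_of_range_alt keys max min = false ↔
      keys = [] ∨
        ((∀ l ∈ keys.map (fun k => PySem.Str.len k), l ≤ max ∧ min ≤ l) ∧
         ∀ a ∈ keys.map (fun k => PySem.Str.len k), ∀ b ∈ keys.map (fun k => PySem.Str.len k), a = b) := by
  unfold lengths_out_of_range_alt
  by_cases he : keys = []
  · simp [he]
  · simp only [List.isEmpty_iff, if_neg he]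
    rw [Bool.or_eq_false_iff]
    simp only [List.any_eq_false, Bool.or_eq_true, decide_eq_true_eq, not_or, not_lt,
      decide_eq_false_iff_not]
    constructor
    · rintro ⟨hr, hc⟩
      refine Or.inr ⟨?_, ?_⟩
      · intro l hl
        exact hr l hl
      · have hle : (PySem.Set.ofList (keys.map fun k => PySem.Str.len k)).length ≤ 1 := by omega
        have := (nodup_length_le_one_iff _ (PySem.Set.nodup_ofList _)).mp hle
        intro a ha b hb
        exact this a ((PySem.Set.mem_ofList _ _).mpr ha) b ((PySem.Set.mem_ofList _ _).mpr hb)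
    · rintro (rfl | ⟨hr, hall⟩)
      · exact absurd rfl he
      refine ⟨?_, ?_⟩
      · intro l hl
        exact hr l hl
      · have : (PySem.Set.ofList (keys.map fun k => PySem.Str.len k)).length ≤ 1 := by
          rw [nodup_length_le_one_iff _ (PySem.Set.nodup_ofList _)]
          intro a ha b hb
          exact hall a ((PySem.Set.mem_ofList _ _).mp ha) b ((PySem.Set.mem_ofList _ _).mp hb)
        omega

theorem lor_eq (keys : List String) (max min : Int) :
    lengths_out_of_range keys max min = lengths_out_of_range_alt keys max min := by
  have key : lengths_out_of_range keys max min = false ↔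
      lengths_out_of_range_alt keys max min = false := by
    rw [show lengths_out_of_range keys max min = pvALoop keys max min keys from rfl,
      pvALoop_false_iff, alt_false_iff]
    constructor
    · intro h
      rcases List.eq_nil_or_concat keys with rfl | _
      · exact Or.inl rfl
      refine Or.inr ⟨?_, ?_⟩
      · intro l hl
        rcases List.mem_map.mp hl with ⟨k, hk, rfl⟩
        exact ⟨(h k hk).1, (h k hk).2.1⟩
      · intro a ha b hb
        rcases List.mem_map.mp ha with ⟨k1, hk1, rfl⟩
        rcases List.mem_map.mp hb with ⟨k2, hk2, rfl⟩
        exact (h k1 hk1).2.2 k2 hk2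
    · rintro (rfl | ⟨hr, hall⟩)
      · intro k hk; cases hk
      intro k hk
      have h1 := hr _ (List.mem_map.mpr ⟨k, hk, rfl⟩)
      refine ⟨h1.1, h1.2, ?_⟩
      intro ck hck
      exact hall _ (List.mem_map.mpr ⟨k, hk, rfl⟩) _ (List.mem_map.mpr ⟨ck, hck, rfl⟩)
  cases hA : lengths_out_of_range keys max min <;> cases hB : lengths_out_of_range_alt keys max min <;>
    simp_all

-- ===== VERDICT (by name: the statement is the Claim_ definition above) =====
theorem lengths_out_of_range_spec : Claim_equal_lengths_out_of_range := by
  intro keys max min _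
  exact lor_eq keys max min
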